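-- pv_equiv track=rewrite | github.com/paleophyte/pyskinny | tools/cme/utils.py | pick_next_dn_number
-- ===== SOURCE A (Python) =====
-- from typing import Optional, Tuple
--
-- def pick_next_dn_number(used_numbers: set, start: int, end: int, prefer: Optional[int] = None) -> int:
--     if prefer is not None:
--         if not (start <= prefer <= end):
--             raise ValueError(f"Preferred DN number {prefer} not in range {start}-{end}.")
--         if prefer in used_numbers:
--             raise ValueError(f"Preferred DN number {prefer} already in use.")
--         return prefer
--     for n in range(start, end + 1):
--         if n not in used_numbers:
--             return n
--     raise ValueError("No free DN numbers in configured range.")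
-- ===== SOURCE B (Python) =====
-- from typing import Optional
--
-- def pick_next_dn_number(used_numbers: set, start: int, end: int, prefer: Optional[int] = None) -> int:
--     if prefer is not None:
--         if not (start <= prefer <= end):
--             raise ValueError(f"Preferred DN number {prefer} not in range {start}-{end}.")
--         if prefer in used_numbers:
--             raise ValueError(f"Preferred DN number {prefer} already in use.")
--         return prefer
--     # The smallest free number is either start itself or the successor of a used number,
--     # so only these candidates need to be examined -- no scan over the range.
--     candidates = {start} | {u + 1 for u in used_numbers}
--     free = {c for c in candidates if start <= c <= end and c not in used_numbers}
--     if not free: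
--         raise ValueError("No free DN numbers in configured range.")
--     return min(free)
-- ===== Notes on version B (the rewrite author's own statement) =====
-- stated objective: faster
-- what changed: Instead of scanning range(start, end+1) for the first free number, B takes the minimum of the candidate set {start} union {u+1 for u in used_numbers} restricted to in-range unused values, so the work depends on |used_numbers| instead of the range width.
import Mathlib
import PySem

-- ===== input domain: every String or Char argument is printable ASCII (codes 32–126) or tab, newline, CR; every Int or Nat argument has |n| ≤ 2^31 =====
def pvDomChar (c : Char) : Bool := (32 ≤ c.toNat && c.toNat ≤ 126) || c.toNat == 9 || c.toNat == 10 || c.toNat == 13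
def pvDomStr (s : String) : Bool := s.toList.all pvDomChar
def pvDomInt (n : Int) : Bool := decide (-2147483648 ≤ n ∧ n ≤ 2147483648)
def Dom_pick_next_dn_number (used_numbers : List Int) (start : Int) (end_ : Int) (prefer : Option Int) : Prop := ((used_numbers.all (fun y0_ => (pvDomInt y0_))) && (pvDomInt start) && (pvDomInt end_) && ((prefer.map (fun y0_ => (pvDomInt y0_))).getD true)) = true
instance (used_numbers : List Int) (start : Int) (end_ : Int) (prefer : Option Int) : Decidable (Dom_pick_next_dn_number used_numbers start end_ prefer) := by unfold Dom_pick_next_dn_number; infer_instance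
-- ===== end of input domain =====

-- ===== PORT A =====
-- B replaces A's range scan by the minimum of a candidate set {start} ∪ {u+1 : u ∈ used};
-- on inputs where Python A raises ValueError the ports return 0; Pre_ excludes exactly those inputs.
-- early-return for-loop of A over range(start, end+1), iterated lazily
def pickLoopA (used : List Int) (n end1 : Int) : Option Int :=
  if _h : n < end1 then
    if used.contains n then pickLoopA used (n + 1) end1 else some n
  else none
termination_by (end1 - n).toNat
decreasing_by omega

def pick_next_dn_number (used_numbers : List Int) (start : Int) (end_ : Int) (prefer : Option Int) : Int :=
  match prefer with
  | some p =>
    if ¬ (start ≤ p ∧ p ≤ end_) then 0        -- raise ValueError (excluded by Pre_)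
    else if used_numbers.contains p then 0    -- raise ValueError (excluded by Pre_)
    else p
  | none =>
    match pickLoopA used_numbers start (end_ + 1) with
    | some n => n
    | none => 0                               -- raise ValueError (excluded by Pre_)

-- ===== PORT B =====
def pick_next_dn_number_alt (used_numbers : List Int) (start : Int) (end_ : Int) (prefer : Option Int) : Int :=
  match prefer with
  | some p =>
    if ¬ (start ≤ p ∧ p ≤ end_) then 0        -- raise ValueError (excluded by Pre_)
    else if used_numbers.contains p then 0    -- raise ValueError (excluded by Pre_)
    else p
  | none =>
    -- candidates = {start} | {u + 1 for u in used_numbers}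
    let candidates := PySem.Set.ofList (start :: used_numbers.map (· + 1))
    -- free = {c for c in candidates if start <= c <= end and c not in used_numbers}
    let free := candidates.filter
      (fun c => decide (start ≤ c) && decide (c ≤ end_) && !used_numbers.contains c)
    match PySem.List.min? free (fun x => x) with
    | some m => m
    | none => 0                               -- raise ValueError (excluded by Pre_)

-- ===== PRECONDITION & SPEC =====
-- Pre_ excludes exactly the inputs on which Python A raises ValueError: a prefer outside
-- [start, end] or already used, or (prefer is None) a range with no free number.
def Pre_pick_next_dn_number (used_numbers : List Int) (start : Int) (end_ : Int) (prefer : Option Int) : Prop :=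
  ((match prefer with
    | some p => decide (start ≤ p) && decide (p ≤ end_) && !used_numbers.contains p
    | none => decide (start ≤ end_) &&
        decide ((((used_numbers.dedup.countP
          (fun n => decide (start ≤ n) && decide (n ≤ end_))) : Int)) < end_ - start + 1)) = true)
instance (used_numbers : List Int) (start : Int) (end_ : Int) (prefer : Option Int) : Decidable (Pre_pick_next_dn_number used_numbers start end_ prefer) := by unfold Pre_pick_next_dn_number; infer_instance

def pvWitness_pick_next_dn_number : List Int × Int × Int × Option Int := ([1, 2, 4], 1, 5, none)

def Spec_pick_next_dn_number (used_numbers : List Int) (start : Int) (end_ : Int) (prefer : Option Int) (out : Int) : Prop := out = pick_next_dn_number_alt used_numbers start end_ prefer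
instance (used_numbers : List Int) (start : Int) (end_ : Int) (prefer : Option Int) (out : Int) : Decidable (Spec_pick_next_dn_number used_numbers start end_ prefer out) := by unfold Spec_pick_next_dn_number; infer_instance

-- ===== CLAIM (what is proved, stated in full; the proofs are below) =====
def Claim_equal_pick_next_dn_number : Prop := ∀ (used_numbers : List Int) (start : Int) (end_ : Int) (prefer : Option Int), Dom_pick_next_dn_number used_numbers start end_ prefer → Pre_pick_next_dn_number used_numbers start end_ prefer → Spec_pick_next_dn_number used_numbers start end_ prefer (pick_next_dn_number used_numbers start end_ prefer)

-- ===== LEMMAS AND PROOFS =====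

-- If the scan returns f, then f is free, lies in [n, end1), and everything before it is used.
theorem pickLoopA_some (used : List Int) (n end1 f : Int)
    (h : pickLoopA used n end1 = some f) :
    f ∉ used ∧ n ≤ f ∧ f < end1 ∧ ∀ m, n ≤ m → m < f → m ∈ used := by
  by_cases hlt : n < end1
  · rw [pickLoopA, dif_pos hlt] at h
    by_cases hu : n ∈ used
    · simp only [List.contains_eq_mem, hu, decide_true, if_true] at h
      obtain ⟨h1, h2, h3, h4⟩ := pickLoopA_some used (n + 1) end1 f h
      refine ⟨h1, by omega, h3, fun m hm1 hm2 => ?_⟩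
      rcases eq_or_lt_of_le hm1 with rfl | hlt2
      · exact hu
      · exact h4 m (by omega) hm2
    · rw [List.contains_eq_mem] at h
      simp only [hu, decide_false, Bool.false_eq_true, if_false, Option.some.injEq] at h
      subst h
      exact ⟨hu, le_refl _, hlt, fun m hm1 hm2 => absurd hm2 (by omega)⟩
  · rw [pickLoopA, dif_neg hlt] at h
    exact absurd h (by simp)
termination_by (end1 - n).toNat
decreasing_by omega

-- If the scan returns nothing, every number in [n, end1) is used.
theorem pickLoopA_none (used : List Int) (n end1 : Int)
    (h : pickLoopA used n end1 = none) :
    ∀ m, n ≤ m → m < end1 → m ∈ used := by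
  intro m hm1 hm2
  by_cases hlt : n < end1
  · rw [pickLoopA, dif_pos hlt] at h
    by_cases hu : n ∈ used
    · simp only [List.contains_eq_mem, hu, decide_true, if_true] at h
      rcases eq_or_lt_of_le hm1 with rfl | hlt2
      · exact hu
      · exact pickLoopA_none used (n + 1) end1 h m (by omega) hm2
    · rw [List.contains_eq_mem] at h
      simp only [hu, decide_false, Bool.false_eq_true, if_false] at h
      exact absurd h (by simp)
  · omega
termination_by (end1 - n).toNat
decreasing_by omega

-- Membership in B's free list, unfolded to arithmetic facts.
theorem mem_freeB (used : List Int) (start end_ c : Int) :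
    c ∈ (PySem.Set.ofList (start :: used.map (· + 1))).filter
        (fun c => decide (start ≤ c) && decide (c ≤ end_) && !used.contains c) ↔
      ((c = start ∨ ∃ u ∈ used, u + 1 = c) ∧ start ≤ c ∧ c ≤ end_ ∧ c ∉ used) := by
  simp [List.mem_filter, PySem.Set.mem_ofList]
  tauto

-- ===== VERDICT (by name: the statement is the Claim_ definition above) =====
theorem pick_next_dn_number_spec : Claim_equal_pick_next_dn_number := by
  intro used start end_ prefer _ _
  unfold Spec_pick_next_dn_number pick_next_dn_number pick_next_dn_number_alt
  cases prefer with
  | some p => rfl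
  | none =>
    simp only
    cases hA : pickLoopA used start (end_ + 1) with
    | none =>
      -- every candidate in range is used, so B's free list is empty
      have hfree : (PySem.Set.ofList (start :: used.map (· + 1))).filter
          (fun c => decide (start ≤ c) && decide (c ≤ end_) && !used.contains c) = [] := by
        rw [List.filter_eq_nil_iff]
        intro c hc
        by_contra hkeep
        have hmem := (mem_freeB used start end_ c).mp (List.mem_filter.mpr ⟨hc, by simpa using hkeep⟩)
        exact hmem.2.2.2 (pickLoopA_none used start (end_ + 1) hA c hmem.2.1 (by omega))
      rw [hfree]
      rfl
    | some f =>
      obtain ⟨hfree, hge, hlt, hall⟩ := pickLoopA_some used start (end_ + 1) f hA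
      -- f is a member of B's free list
      have hfmem : f ∈ (PySem.Set.ofList (start :: used.map (· + 1))).filter
          (fun c => decide (start ≤ c) && decide (c ≤ end_) && !used.contains c) := by
        rw [mem_freeB]
        refine ⟨?_, hge, by omega, hfree⟩
        rcases eq_or_lt_of_le hge with rfl | hgt
        · exact Or.inl rfl
        · exact Or.inr ⟨f - 1, hall (f - 1) (by omega) (by omega), by ring⟩
      -- f is a lower bound of B's free list
      have hlb : ∀ c ∈ (PySem.Set.ofList (start :: used.map (· + 1))).filter
          (fun c => decide (start ≤ c) && decide (c ≤ end_) && !used.contains c), f ≤ c := by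
        intro c hc
        obtain ⟨_, hc1, hc2, hc3⟩ := (mem_freeB used start end_ c).mp hc
        by_contra hcf
        exact hc3 (hall c hc1 (by omega))
      cases hB : PySem.List.min? ((PySem.Set.ofList (start :: used.map (· + 1))).filter
          (fun c => decide (start ≤ c) && decide (c ≤ end_) && !used.contains c)) (fun x => x) with
      | none =>
        rw [PySem.List.min?_eq_none_iff] at hB
        rw [hB] at hfmem
        exact absurd hfmem (by simp)
      | some m =>
        have hm1 : m ∈ _ := PySem.List.min?_mem hB
        have hm2 := PySem.List.min?_isMin hB f hfmem
        exact le_antisymm (hlb m hm1) hm2
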